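-- pv_equiv track=rewrite | github.com/Argimirodelpozo/teal-verifier | cbmc_transpiler/AVMTranspiler.py | _parse_bytecblock_args
-- ===== SOURCE A (Python) =====
-- def _parse_bytecblock_args(raw: str) -> list[str]:
--     """Parse bytecblock arguments handling mixed quoted strings and hex values.
--
--     tree-sitter-teal's string_argument rule is greedy and merges all content
--     between the first and last quote into a single node.  We parse manually
--     and convert quoted strings to hex so tree-sitter only sees hex arguments.
--     """
--     args: list[str] = []
--     i = 0
--     while i < len(raw):
--         if raw[i] in (" ", "\t"):
--             i += 1
--             continue
--         if raw[i] == '"':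
--             # Quoted string: find matching close quote
--             j = raw.index('"', i + 1)
--             text = raw[i + 1 : j]
--             hex_str = "0x" + text.encode("ascii").hex()
--             args.append(hex_str if hex_str != "0x" else "0x00")
--             i = j + 1
--         else:
--             # Unquoted token (hex literal, TMPL_*, etc.)
--             j = i
--             while j < len(raw) and raw[j] not in (" ", "\t"):
--                 j += 1
--             token = raw[i:j]
--             if token.startswith("TMPL_"):
--                 args.append("0x00")
--             else:
--                 args.append(token)
--             i = j
--     return args
-- ===== SOURCE B (Python) =====
-- import re
--
-- def _parse_bytecblock_args(raw: str) -> list[str]: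
--     """Tokenize with one regex pass (quoted-or-bare), then convert each token."""
--     args: list[str] = []
--     for tok in re.findall(r'"[^"]*"|[^ \t]+', raw):
--         if tok.startswith('"'):
--             if len(tok) >= 2 and tok.endswith('"'):
--                 inner = tok[1:-1]
--                 args.append("0x" + inner.encode("ascii").hex() if inner else "0x00")
--             else:
--                 raise ValueError("unterminated quote in bytecblock arguments")
--         elif tok.startswith("TMPL_"):
--             args.append("0x00")
--         else:
--             args.append(tok)
--     return args
-- ===== Notes on version B (the rewrite author's own statement) =====
-- stated objective: simpler
-- what changed: Replaced A's index-based while loop (manual raw.index scanning with inline conversion) by a two-stage decomposition: one regex pass tokenizes the input into quoted/bare tokens, then a plain loop converts each token; the C regex engine replaces the per-character Python loop.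
import Mathlib
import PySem

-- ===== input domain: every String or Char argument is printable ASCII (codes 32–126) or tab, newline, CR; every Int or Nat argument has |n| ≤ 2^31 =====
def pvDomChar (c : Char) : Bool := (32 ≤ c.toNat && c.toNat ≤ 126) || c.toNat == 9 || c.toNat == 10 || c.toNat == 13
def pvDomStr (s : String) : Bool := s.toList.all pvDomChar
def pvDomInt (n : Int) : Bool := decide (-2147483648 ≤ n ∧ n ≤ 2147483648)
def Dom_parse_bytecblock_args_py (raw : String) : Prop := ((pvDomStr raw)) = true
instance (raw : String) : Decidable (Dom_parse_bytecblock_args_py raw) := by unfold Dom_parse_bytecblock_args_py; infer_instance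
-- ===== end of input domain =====

-- B replaces A's index-juggling while loop by a regex-style tokenize-then-map decomposition (objective: simpler); equal return values wherever A returns.

-- ===== PORT A =====
-- shared by both ports: bytes.hex() of an ASCII string (Dom guarantees codes < 128)
def pvHexDigit (n : Nat) : Char := if n < 10 then Char.ofNat (48 + n) else Char.ofNat (87 + n)
def pvEncodeHex (cs : List Char) : List Char := cs.flatMap (fun c => [pvHexDigit (c.toNat / 16), pvHexDigit (c.toNat % 16)])
-- `raw[j] not in (" ", "\t")`
def pvNotWs (c : Char) : Bool := !(c == ' ' || c == '\t')

-- A's while loop: the index i is represented by the remaining suffix; args grows by append.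
def pvLoopA (cs : List Char) (args : List String) : List String :=
  match cs with
  | [] => args
  | c :: rest =>
    if c == ' ' || c == '\t' then pvLoopA rest args
    else if c == '"' then
      if '"' ∈ rest then
        -- j = raw.index('"', i+1); text = raw[i+1:j]; continue at j+1
        let text := rest.takeWhile (fun d => !(d == '"'))
        let hexCs := '0' :: 'x' :: pvEncodeHex text
        pvLoopA ((rest.dropWhile (fun d => !(d == '"'))).drop 1)
          (args ++ [if hexCs = ['0', 'x'] then "0x00" else String.ofList hexCs])
      else args  -- raw.index raises ValueError: excluded by Pre_
    else
      let tok := (c :: rest).takeWhile pvNotWs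
      pvLoopA ((c :: rest).dropWhile pvNotWs)
        (args ++ [if "TMPL_".toList.isPrefixOf tok then "0x00" else String.ofList tok])
termination_by cs.length
decreasing_by
  · simp
  · have h1 := List.length_dropWhile_le (fun d => !(d == '"')) rest
    simp at *; omega
  · rename_i hws _
    have hc : pvNotWs c = true := by
      simp only [Bool.or_eq_true, beq_iff_eq, not_or] at hws
      simp [pvNotWs, hws.1, hws.2]
    rw [List.dropWhile_cons_of_pos hc]
    have := List.length_dropWhile_le pvNotWs rest
    simp; omega

def parse_bytecblock_args_py (raw : String) : List String := pvLoopA raw.toList []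

-- ===== PORT B =====
-- re.findall(r'"[^"]*"|[^ \t]+', raw): at each position the first branch matches iff the
-- char is '"' and a closing '"' exists later; otherwise the bare-token branch; ws is skipped.
def pvTokenizeB (cs : List Char) : List (List Char) :=
  match cs with
  | [] => []
  | c :: rest =>
    if c == ' ' || c == '\t' then pvTokenizeB rest
    else if c == '"' && rest.contains '"' then
      ('"' :: (rest.takeWhile (fun d => !(d == '"')) ++ ['"'])) ::
        pvTokenizeB ((rest.dropWhile (fun d => !(d == '"'))).drop 1)
    else ((c :: rest).takeWhile pvNotWs) :: pvTokenizeB ((c :: rest).dropWhile pvNotWs)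
termination_by cs.length
decreasing_by
  · simp
  · have h1 := List.length_dropWhile_le (fun d => !(d == '"')) rest
    simp at *; omega
  · rename_i hws _
    have hc : pvNotWs c = true := by
      simp only [Bool.or_eq_true, beq_iff_eq, not_or] at hws
      simp [pvNotWs, hws.1, hws.2]
    rw [List.dropWhile_cons_of_pos hc]
    have := List.length_dropWhile_le pvNotWs rest
    simp; omega

def pvConvertB (tok : List Char) : String :=
  if tok.take 1 = ['"'] then
    if 2 ≤ tok.length ∧ tok.getLast? = some '"' then
      let inner := (tok.drop 1).dropLast
      if inner = [] then "0x00" else String.ofList ('0' :: 'x' :: pvEncodeHex inner)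
    else ""  -- Python B raises ValueError on such a token; Pre_ excludes these inputs
  else if "TMPL_".toList.isPrefixOf tok then "0x00" else String.ofList tok

def parse_bytecblock_args_py_alt (raw : String) : List String :=
  (pvTokenizeB raw.toList).map pvConvertB

-- ===== PRECONDITION & SPEC =====
-- 3-state lexical scan (0 = between tokens, 1 = inside a quoted argument, 2 = inside a bare
-- token); Pre_ excludes exactly the inputs ending inside an unterminated quoted argument,
-- on which A's raw.index raises ValueError (and B raises ValueError as well).
def pvScan (cs : List Char) (st : Nat) : Nat :=
  match cs with
  | [] => st
  | c :: rest =>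
    if st = 1 then pvScan rest (if c == '"' then 0 else 1)
    else if c == ' ' || c == '\t' then pvScan rest 0
    else if st = 0 && c == '"' then pvScan rest 1
    else pvScan rest 2

def Pre_parse_bytecblock_args_py (raw : String) : Prop := pvScan raw.toList 0 ≠ 1
instance (raw : String) : Decidable (Pre_parse_bytecblock_args_py raw) := by
  unfold Pre_parse_bytecblock_args_py; infer_instance

def pvWitness_parse_bytecblock_args_py : String := "\"ab\" \"\" TMPL_X 0x0102 b64(x)"

def Spec_parse_bytecblock_args_py (raw : String) (out : List String) : Prop :=
  out = parse_bytecblock_args_py_alt raw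
instance (raw : String) (out : List String) : Decidable (Spec_parse_bytecblock_args_py raw out) := by
  unfold Spec_parse_bytecblock_args_py; infer_instance

-- ===== CLAIM (what is proved, stated in full; the proofs are below) =====
def Claim_equal_parse_bytecblock_args_py : Prop :=
  ∀ (raw : String), Dom_parse_bytecblock_args_py raw → Pre_parse_bytecblock_args_py raw →
    Spec_parse_bytecblock_args_py raw (parse_bytecblock_args_py raw)

-- ===== LEMMAS AND PROOFS =====

theorem pvEncodeHex_eq_nil (cs : List Char) : pvEncodeHex cs = [] ↔ cs = [] := by
  cases cs <;> simp [pvEncodeHex]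

-- one-step equations of the two recursions
theorem pvLoopA_nil (args : List String) : pvLoopA [] args = args := by
  rw [pvLoopA]

theorem pvLoopA_ws (c : Char) (rest : List Char) (args : List String)
    (h : (c == ' ' || c == '\t') = true) : pvLoopA (c :: rest) args = pvLoopA rest args := by
  rw [pvLoopA]; simp [h]

theorem pvLoopA_quote (rest : List Char) (args : List String) (hm : '"' ∈ rest) :
    pvLoopA ('"' :: rest) args =
      pvLoopA ((rest.dropWhile (fun d => !(d == '"'))).drop 1)
        (args ++ [if '0' :: 'x' :: pvEncodeHex (rest.takeWhile (fun d => !(d == '"'))) = ['0', 'x']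
                  then "0x00"
                  else String.ofList ('0' :: 'x' :: pvEncodeHex (rest.takeWhile (fun d => !(d == '"'))))]) := by
  rw [pvLoopA]; simp [hm]

theorem pvLoopA_tok (c : Char) (rest : List Char) (args : List String)
    (hws : (c == ' ' || c == '\t') = false) (hq : (c == '"') = false) :
    pvLoopA (c :: rest) args =
      pvLoopA ((c :: rest).dropWhile pvNotWs)
        (args ++ [if "TMPL_".toList.isPrefixOf ((c :: rest).takeWhile pvNotWs) then "0x00"
                  else String.ofList ((c :: rest).takeWhile pvNotWs)]) := by
  rw [pvLoopA]; simp [hws, hq]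

theorem pvTokenizeB_nil : pvTokenizeB [] = [] := by
  rw [pvTokenizeB]

theorem pvTokenizeB_ws (c : Char) (rest : List Char)
    (h : (c == ' ' || c == '\t') = true) : pvTokenizeB (c :: rest) = pvTokenizeB rest := by
  rw [pvTokenizeB]; simp [h]

theorem pvTokenizeB_quote (rest : List Char) (hm : '"' ∈ rest) :
    pvTokenizeB ('"' :: rest) =
      ('"' :: (rest.takeWhile (fun d => !(d == '"')) ++ ['"'])) ::
        pvTokenizeB ((rest.dropWhile (fun d => !(d == '"'))).drop 1) := by
  rw [pvTokenizeB]
  have hc : ('"' == '"' && rest.contains '"') = true := by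
    simp [List.contains_eq_mem, hm]
  simp only [hc]
  simp

theorem pvTokenizeB_tok (c : Char) (rest : List Char)
    (hws : (c == ' ' || c == '\t') = false) (hg : (c == '"' && rest.contains '"') = false) :
    pvTokenizeB (c :: rest) =
      ((c :: rest).takeWhile pvNotWs) :: pvTokenizeB ((c :: rest).dropWhile pvNotWs) := by
  rw [pvTokenizeB]
  simp [hws]
  intro h1 h2
  rw [h1] at hg
  simp [List.contains_eq_mem, h2] at hg

-- scanning a quote-free segment inside a quoted argument, then the closing quote
theorem pvScan_in_quote (t : List Char) (r : List Char)
    (h : ∀ c ∈ t, (c == '"') = false) : pvScan (t ++ '"' :: r) 1 = pvScan r 0 := by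
  induction t with
  | nil => simp [pvScan]
  | cons c t ih =>
    have hc := h c (by simp)
    simp only [List.cons_append, pvScan, hc]
    exact ih (fun d hd => h d (by simp [hd]))

theorem pvScan_unterminated (t : List Char) (h : ∀ c ∈ t, (c == '"') = false) :
    pvScan t 1 = 1 := by
  induction t with
  | nil => rfl
  | cons c t ih =>
    have hc := h c (by simp)
    simp only [pvScan, hc]
    exact ih (fun d hd => h d (by simp [hd]))

-- scanning a whitespace-free segment inside a bare token
theorem pvScan_in_token (t : List Char) (r : List Char)
    (h : ∀ c ∈ t, pvNotWs c = true) : pvScan (t ++ r) 2 = pvScan r 2 := by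
  induction t with
  | nil => rfl
  | cons c t ih =>
    have hc := h c (by simp)
    have hws : (c == ' ' || c == '\t') = false := by
      simpa [pvNotWs] using hc
    simp only [List.cons_append, pvScan, hws]
    simpa using ih (fun d hd => h d (by simp [hd]))

theorem pvScan_ws_head (c : Char) (r : List Char) (h : (c == ' ' || c == '\t') = true) :
    pvScan (c :: r) 2 = pvScan (c :: r) 0 := by
  simp [pvScan, h]

theorem pvDropWhile_quote (rest : List Char) (h : '"' ∈ rest) :
    ∃ r', rest.dropWhile (fun d => !(d == '"')) = '"' :: r' := by
  induction rest with
  | nil => simp at h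
  | cons c t ih =>
    by_cases hc : c = '"'
    · subst hc; exact ⟨t, by simp [List.dropWhile]⟩
    · have hm : '"' ∈ t := by
        rcases (List.mem_cons.mp h) with h1 | h1
        · exact absurd h1.symm hc
        · exact h1
      rcases ih hm with ⟨r', hr⟩
      have hcf : (c == '"') = false := beq_eq_false_iff_ne.mpr hc
      exact ⟨r', by simp [List.dropWhile, hcf, hr]⟩

theorem pvConvertB_quote (t : List Char) (hq : ∀ d ∈ t, (d == '"') = false) :
    pvConvertB ('"' :: (t ++ ['"'])) =
      (if '0' :: 'x' :: pvEncodeHex t = ['0', 'x'] then "0x00"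
       else String.ofList ('0' :: 'x' :: pvEncodeHex t)) := by
  have htake : ('"' :: (t ++ ['"'])).take 1 = ['"'] := by simp
  have hlast : ('"' :: (t ++ ['"'])).getLast? = some '"' := by
    rw [show '"' :: (t ++ ['"']) = ('"' :: t) ++ ['"'] by simp]
    exact List.getLast?_concat
  have hinner : (('"' :: (t ++ ['"'])).drop 1).dropLast = t := by
    simp
  rw [pvConvertB]
  rw [if_pos htake, if_pos ⟨by simp, hlast⟩]
  simp only [hinner]
  by_cases hte : t = []
  · subst hte; simp [pvEncodeHex]
  · rw [if_neg hte, if_neg (by simp [pvEncodeHex_eq_nil, hte])]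

theorem pvConvertB_tok (c : Char) (t : List Char) (hq : (c == '"') = false) :
    pvConvertB (c :: t) =
      (if "TMPL_".toList.isPrefixOf (c :: t) then "0x00" else String.ofList (c :: t)) := by
  rw [pvConvertB]
  rw [if_neg (by simp; simpa using hq)]

theorem pvMain : ∀ (n : Nat) (cs : List Char) (args : List String), cs.length ≤ n →
    pvScan cs 0 ≠ 1 → pvLoopA cs args = args ++ (pvTokenizeB cs).map pvConvertB := by
  intro n
  induction n with
  | zero =>
    intro cs args hn _
    have hcs : cs = [] := List.eq_nil_of_length_eq_zero (Nat.le_zero.mp hn)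
    subst hcs; simp [pvLoopA_nil, pvTokenizeB_nil]
  | succ n ih =>
    intro cs args hn hpre
    match cs with
    | [] => simp [pvLoopA_nil, pvTokenizeB_nil]
    | c :: rest =>
      by_cases hws : (c == ' ' || c == '\t') = true
      · -- whitespace: skip
        have hscan : pvScan (c :: rest) 0 = pvScan rest 0 := by simp [pvScan, hws]
        rw [pvLoopA_ws c rest args hws, pvTokenizeB_ws c rest hws]
        exact ih rest args (by simp at hn; omega) (by rw [hscan] at hpre; exact hpre)
      · have hws' : (c == ' ' || c == '\t') = false := by simpa using hws
        by_cases hq : c = '"'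
        · subst hq
          by_cases hm : '"' ∈ rest
          · -- quoted argument with a closing quote
            rcases pvDropWhile_quote rest hm with ⟨r', hr⟩
            have hrest : rest = rest.takeWhile (fun d => !(d == '"')) ++ '"' :: r' := by
              conv_lhs => rw [← List.takeWhile_append_dropWhile (p := fun d => !(d == '"')) (l := rest)]
              rw [hr]
            have htq : ∀ d ∈ rest.takeWhile (fun d => !(d == '"')), (d == '"') = false := by
              intro d hd
              have := List.mem_takeWhile_imp hd
              simpa using this
            have hscan : pvScan ('"' :: rest) 0 = pvScan r' 0 := by
              have h0 : pvScan ('"' :: rest) 0 = pvScan rest 1 := by simp [pvScan]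
              rw [h0]
              conv_lhs => rw [hrest]
              exact pvScan_in_quote _ r' htq
            have hlen : r'.length ≤ n := by
              have := congrArg List.length hrest
              simp at this hn; omega
            rw [pvLoopA_quote rest args hm, pvTokenizeB_quote rest hm, hr]
            simp only [List.drop_succ_cons, List.drop_zero, List.map_cons]
            rw [ih r' _ hlen (by rw [hscan] at hpre; exact hpre)]
            rw [pvConvertB_quote _ htq]
            simp
          · -- unterminated quote: contradicts Pre_
            exfalso
            apply hpre
            have htq : ∀ d ∈ rest, (d == '"') = false := by
              intro d hd
              by_cases h : d = '"'
              · exact absurd (h ▸ hd) hm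
              · simp [h]
            have h0 : pvScan ('"' :: rest) 0 = pvScan rest 1 := by simp [pvScan]
            rw [h0]
            exact pvScan_unterminated rest htq
        · -- bare token
          have hq' : (c == '"') = false := beq_eq_false_iff_ne.mpr hq
          have hnw : pvNotWs c = true := by simp [pvNotWs, hws']
          have hg : (c == '"' && rest.contains '"') = false := by simp [hq']
          have htw : ∀ d ∈ rest.takeWhile pvNotWs, pvNotWs d = true :=
            fun d hd => List.mem_takeWhile_imp hd
          have hscan : pvScan (c :: rest) 0 = pvScan (rest.dropWhile pvNotWs) 2 := by
            have h1 : pvScan (c :: rest) 0 = pvScan rest 2 := by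
              simp [pvScan, hws', hq']
            rw [h1]
            conv_lhs => rw [← List.takeWhile_append_dropWhile (p := pvNotWs) (l := rest)]
            exact pvScan_in_token _ _ htw
          have hpre' : pvScan (rest.dropWhile pvNotWs) 0 ≠ 1 := by
            cases hdw : rest.dropWhile pvNotWs with
            | nil => simp [pvScan]
            | cons c' r'' =>
              have h2 := List.head?_dropWhile_not pvNotWs rest
              rw [hdw] at h2
              have h2' : pvNotWs c' = false := by simpa using h2
              have hcw : (c' == ' ' || c' == '\t') = true := by
                cases hb : (c' == ' ' || c' == '\t') with
                | false => rw [pvNotWs, hb] at h2'; simp at h2'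
                | true => rfl
              rw [← pvScan_ws_head c' r'' hcw, ← hdw, ← hscan]
              exact hpre
          have hlen : (rest.dropWhile pvNotWs).length ≤ n := by
            have := List.length_dropWhile_le pvNotWs rest
            simp at hn; omega
          rw [pvLoopA_tok c rest args hws' hq', pvTokenizeB_tok c rest hws' hg]
          rw [List.dropWhile_cons_of_pos hnw, List.takeWhile_cons_of_pos hnw, List.map_cons]
          rw [ih _ _ hlen hpre']
          rw [pvConvertB_tok c _ hq']
          simp

-- ===== VERDICT (by name: the statement is the Claim_ definition above) =====
theorem parse_bytecblock_args_py_spec : Claim_equal_parse_bytecblock_args_py := by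
  intro raw _ hpre
  unfold Spec_parse_bytecblock_args_py parse_bytecblock_args_py parse_bytecblock_args_py_alt
  exact pvMain raw.toList.length raw.toList [] (le_refl _) hpre
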